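-- pv_equiv track=rewrite | github.com/primrose101/CS322 | finite_state_machines/data_types.py | unary_lexer
-- ===== SOURCE A (Python) =====
-- def unary_lexer(string_input, index):
--     i = index
--     state_table = [[1, 1, 2, 2],
--                    [2, 2, 1, 2],
--                    [2, 2, 2, 2], ]
--
--     state = 0
--     infut = 0
--     string_length = len(string_input)
--     while i != string_length:
--         if string_input[i] == '-':
--             infut = 0
--         elif string_input[i] == '+':
--             infut = 1
--         elif string_input[i].isdigit():
--             infut = 2
--         else:
--             infut = 3
--         state = state_table[state][infut]
--         if state == 2:
--             break
--         i += 1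
--     return i - index
-- ===== SOURCE B (Python) =====
-- def unary_lexer(string_input, index):
--     n = len(string_input)
--     if index == n:
--         return 0
--     c = string_input[index]
--     if c == '+' or c == '-':
--         i = index + 1
--         while i != n and string_input[i].isdigit():
--             i += 1
--         return i - index
--     return 0
-- ===== Notes on version B (the rewrite author's own statement) =====
-- stated objective: simpler
-- what changed: Replaces the table-driven DFA (3x4 state table, state and input-class variables, one generic loop) by a direct guard for a leading '+'/'-' followed by a plain digit-scan while loop.
import Mathlib
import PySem

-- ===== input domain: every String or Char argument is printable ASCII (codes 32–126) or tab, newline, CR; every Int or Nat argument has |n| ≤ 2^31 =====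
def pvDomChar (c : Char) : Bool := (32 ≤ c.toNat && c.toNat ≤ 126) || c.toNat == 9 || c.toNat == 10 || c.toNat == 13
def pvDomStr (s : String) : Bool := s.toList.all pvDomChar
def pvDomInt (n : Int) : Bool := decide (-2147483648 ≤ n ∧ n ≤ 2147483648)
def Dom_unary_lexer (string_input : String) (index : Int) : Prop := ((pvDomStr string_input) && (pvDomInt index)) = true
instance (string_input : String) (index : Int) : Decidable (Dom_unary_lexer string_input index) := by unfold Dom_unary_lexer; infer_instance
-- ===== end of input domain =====

-- B replaces A's table-driven DFA (state table + state/input variables) by a direct guarded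
-- digit scan; objective: simpler. Equivalence is about the return value; neither mutates its input.

-- ===== PORT A =====
-- A's state table, verbatim.
def pvStateTable : List (List Int) := [[1, 1, 2, 2], [2, 2, 1, 2], [2, 2, 2, 2]]

-- A's while loop: returns the final value of i.  On an IndexError of string_input[i]
-- (pyGet? = none; excluded by Pre_) it stops and returns the current i.
def pvLoopA (s : List Char) (i : Int) (state : Int) : Int :=
  if _h : i = (s.length : Int) then i
  else
    match _h2 : PySem.List.pyGet? s i with
    | none => i
    | some c =>
      let infut : Int :=
        if c = '-' then 0
        else if c = '+' then 1
        else if PySem.Chars.isdigit c then 2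
        else 3
      let state' := (PySem.List.pyGet? ((PySem.List.pyGet? pvStateTable state).getD []) infut).getD 0
      if state' = 2 then i else pvLoopA s (i + 1) state'
termination_by ((s.length : Int) - i).toNat
decreasing_by
  have hr : PySem.Raise.InRange s.length i := by
    by_contra hn
    rw [(PySem.List.pyGet?_eq_none_iff s i).mpr hn] at _h2
    simp at _h2
  unfold PySem.Raise.InRange at hr
  omega

def unary_lexer (string_input : String) (index : Int) : Int :=
  pvLoopA string_input.toList index 0 - index

-- ===== PORT B =====
-- B's digit scan: advances i while string_input[i] is a digit; returns final i.
def pvScanDigits (s : List Char) (i : Int) : Int :=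
  if _h : i = (s.length : Int) then i
  else
    match _h2 : PySem.List.pyGet? s i with
    | none => i
    | some c => if PySem.Chars.isdigit c then pvScanDigits s (i + 1) else i
termination_by ((s.length : Int) - i).toNat
decreasing_by
  have hr : PySem.Raise.InRange s.length i := by
    by_contra hn
    rw [(PySem.List.pyGet?_eq_none_iff s i).mpr hn] at _h2
    simp at _h2
  unfold PySem.Raise.InRange at hr
  omega

def unary_lexer_alt (string_input : String) (index : Int) : Int :=
  let s := string_input.toList
  if index = (s.length : Int) then 0
  else
    match PySem.List.pyGet? s index with
    | none => 0
    | some c =>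
      if c = '+' ∨ c = '-' then pvScanDigits s (index + 1) - index
      else 0

-- ===== PRECONDITION & SPEC =====
-- Pre_ excludes exactly the inputs on which Python A raises IndexError
-- (index outside [-len, len]); A returns normally on everything admitted.
def Pre_unary_lexer (string_input : String) (index : Int) : Prop :=
  -(string_input.toList.length : Int) ≤ index ∧ index ≤ (string_input.toList.length : Int)
instance (string_input : String) (index : Int) : Decidable (Pre_unary_lexer string_input index) := by
  unfold Pre_unary_lexer; infer_instance

def pvWitness_unary_lexer : String × Int := ("+12x", 0)

def Spec_unary_lexer (string_input : String) (index : Int) (out : Int) : Prop := out = unary_lexer_alt string_input index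
instance (string_input : String) (index : Int) (out : Int) : Decidable (Spec_unary_lexer string_input index out) := by unfold Spec_unary_lexer; infer_instance

-- ===== CLAIM (what is proved, stated in full; the proofs are below) =====
def Claim_equal_unary_lexer : Prop := ∀ (string_input : String) (index : Int), Dom_unary_lexer string_input index → Pre_unary_lexer string_input index → Spec_unary_lexer string_input index (unary_lexer string_input index)

-- ===== LEMMAS AND PROOFS =====

-- A's loop in state 1 is exactly B's digit scan.
theorem pvLoopA_one_eq_scan (s : List Char) (i : Int) :
    pvLoopA s i 1 = pvScanDigits s i := by
  rw [pvLoopA, pvScanDigits]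
  split
  · rfl
  · split
    · rfl
    · rename_i c _
      by_cases hm : c = '-'
      · simp [hm, pvStateTable, PySem.List.pyGet?, PySem.List.pyIdx?, PySem.Chars.isdigit]
      · by_cases hp : c = '+'
        · simp [hp, pvStateTable, PySem.List.pyGet?, PySem.List.pyIdx?, PySem.Chars.isdigit]
        · by_cases hd : PySem.Chars.isdigit c
          · have h1 : (PySem.List.pyGet? ((PySem.List.pyGet? pvStateTable 1).getD []) 2).getD 0
                = (1 : Int) := by decide
            simp only [hm, hp, hd, if_true, if_false, h1]
            rw [if_neg (by decide), pvLoopA_one_eq_scan s (i + 1)]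
          · simp [hm, hp, hd, pvStateTable, PySem.List.pyGet?, PySem.List.pyIdx?]
termination_by ((s.length : Int) - i).toNat
decreasing_by
  rename_i _ _ h2
  have hr : PySem.Raise.InRange s.length i := by
    by_contra hn
    rw [(PySem.List.pyGet?_eq_none_iff s i).mpr hn] at h2
    simp at h2
  unfold PySem.Raise.InRange at hr
  omega

-- ===== VERDICT (by name: the statement is the Claim_ definition above) =====
theorem unary_lexer_spec : Claim_equal_unary_lexer := by
  intro s index _ _
  unfold Spec_unary_lexer unary_lexer unary_lexer_alt
  rw [pvLoopA]
  split
  · rename_i h; rw [if_pos h]; omega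
  · rename_i h
    rw [if_neg h]
    split
    · rename_i h2; rw [h2]; simp
    · rename_i c h2
      rw [h2]
      by_cases hm : c = '-'
      · simp [hm, pvStateTable, PySem.List.pyGet?, PySem.List.pyIdx?, pvLoopA_one_eq_scan]
      · by_cases hp : c = '+'
        · simp [hp, pvStateTable, PySem.List.pyGet?, PySem.List.pyIdx?, pvLoopA_one_eq_scan]
        · by_cases hd : PySem.Chars.isdigit c
          · simp [hm, hp, hd, pvStateTable, PySem.List.pyGet?, PySem.List.pyIdx?]
          · simp [hm, hp, hd, pvStateTable, PySem.List.pyGet?, PySem.List.pyIdx?]
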